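-- pv_equiv track=rewrite | github.com/PhamDuc0104/Data-structure | cau4t.py | count_pairs_sum_less_than_k
-- ===== SOURCE A (Python) =====
-- def count_pairs_sum_less_than_k(arr, k):
--     arr.sort()  # O(n log n)
--     count = 0
--     left = 0
--     right = len(arr) - 1
--
--     while left < right:
--         if arr[left] + arr[right] < k:
--             # Tất cả các cặp từ left đến right-1 đều hợp lệ
--             count += (right - left)
--             left += 1
--         else:
--             right -= 1
--
--     return count
-- ===== SOURCE B (Python) =====
-- def count_pairs_sum_less_than_k(arr, k):
--     arr.sort()  # same in-place sort as A
--     n = len(arr)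
--     count = 0
--     for i in range(n):
--         target = k - arr[i]
--         # hand-written bisect_left(arr, target, i+1, n)
--         lo, hi = i + 1, n
--         while lo < hi:
--             mid = (lo + hi) // 2
--             if arr[mid] < target:
--                 lo = mid + 1
--             else:
--                 hi = mid
--         count += lo - (i + 1)
--     return count
-- ===== Notes on version B (the rewrite author's own statement) =====
-- stated objective: alternative
-- what changed: Replaces the converging two-pointer sweep with a per-element binary search: for each i, a hand-written bisect_left over the sorted suffix finds how many later elements pair with arr[i] to a sum below k.
import Mathlib
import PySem

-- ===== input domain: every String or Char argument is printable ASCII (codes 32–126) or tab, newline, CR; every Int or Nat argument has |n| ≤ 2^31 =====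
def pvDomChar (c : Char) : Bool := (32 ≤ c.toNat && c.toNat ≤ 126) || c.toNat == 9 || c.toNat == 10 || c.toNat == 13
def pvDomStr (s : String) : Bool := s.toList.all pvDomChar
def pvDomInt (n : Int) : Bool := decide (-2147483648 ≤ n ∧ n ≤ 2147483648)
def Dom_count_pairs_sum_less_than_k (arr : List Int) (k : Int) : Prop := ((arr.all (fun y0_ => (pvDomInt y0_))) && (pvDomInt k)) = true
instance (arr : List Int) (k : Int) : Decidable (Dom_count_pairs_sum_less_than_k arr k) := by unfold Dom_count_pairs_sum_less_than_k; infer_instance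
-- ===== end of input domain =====

-- B replaces A's two-pointer sweep by a per-element hand-written bisect_left over the
-- sorted suffix (alternative algorithm, same O(n log n) cost); both sort arr in place in
-- Python (identical mutation), and the equivalence proved here is about the return value.

-- ===== PORT A =====
-- while-loop of A; indices are always in range when left < right holds, so getD is exact here
def cpLoopA (s : List Int) (k : Int) (count left right : Int) : Int :=
  if left < right then
    if s.getD left.toNat 0 + s.getD right.toNat 0 < k then
      cpLoopA s k (count + (right - left)) (left + 1) right
    else
      cpLoopA s k count left (right - 1)
  else count
termination_by (right - left).toNat
decreasing_by all_goals omega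

def count_pairs_sum_less_than_k (arr : List Int) (k : Int) : Int :=
  let s := PySem.List.sorted arr (fun x => x) false
  cpLoopA s k 0 0 ((s.length : Int) - 1)

-- ===== PORT B =====
-- hand-written bisect_left(arr, target, lo, hi) from Source B
def cpBisect (s : List Int) (target : Int) (lo hi : Nat) : Nat :=
  if lo < hi then
    let mid := (lo + hi) / 2
    if s.getD mid 0 < target then cpBisect s target (mid + 1) hi
    else cpBisect s target lo mid
  else lo
termination_by hi - lo
decreasing_by all_goals omega

def count_pairs_sum_less_than_k_alt (arr : List Int) (k : Int) : Int :=
  let s := PySem.List.sorted arr (fun x => x) false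
  let n := s.length
  (List.range n).foldl
    (fun count i =>
      count + (((cpBisect s (k - s.getD i 0) (i + 1) n : Nat) : Int) - ((i : Int) + 1))) 0

-- ===== PRECONDITION & SPEC =====
def Spec_count_pairs_sum_less_than_k (arr : List Int) (k : Int) (out : Int) : Prop := out = count_pairs_sum_less_than_k_alt arr k
instance (arr : List Int) (k : Int) (out : Int) : Decidable (Spec_count_pairs_sum_less_than_k arr k out) := by unfold Spec_count_pairs_sum_less_than_k; infer_instance

-- ===== CLAIM (what is proved, stated in full; the proofs are below) =====
def Claim_equal_count_pairs_sum_less_than_k : Prop := ∀ (arr : List Int) (k : Int), Dom_count_pairs_sum_less_than_k arr k → Spec_count_pairs_sum_less_than_k arr k (count_pairs_sum_less_than_k arr k)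

-- ===== LEMMAS AND PROOFS =====

-- number of valid pairs (i, j), l ≤ i < j ≤ r, in the sorted list s
def pairQ (s : List Int) (k : Int) (l r : Nat) : Nat :=
  ∑ i ∈ Finset.Ico l r, ((Finset.Ico (i + 1) (r + 1)).filter (fun j => s.getD i 0 + s.getD j 0 < k)).card

theorem sorted_getD_mono (xs : List Int) (i j : Nat) (hij : i ≤ j)
    (hj : j < (PySem.List.sorted xs (fun x => x) false).length) :
    (PySem.List.sorted xs (fun x => x) false).getD i 0 ≤ (PySem.List.sorted xs (fun x => x) false).getD j 0 := by
  have hi : i < (PySem.List.sorted xs (fun x => x) false).length := lt_of_le_of_lt hij hj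
  rw [List.getD_eq_getElem _ _ hi, List.getD_eq_getElem _ _ hj]
  exact PySem.List.sorted_id_getElem_mono xs hij hj

theorem bisect_spec (s : List Int) (t : Int)
    (hm : ∀ i j, i ≤ j → j < s.length → s.getD i 0 ≤ s.getD j 0) :
    ∀ d lo hi, hi - lo = d → lo ≤ hi → hi ≤ s.length →
      lo ≤ cpBisect s t lo hi ∧ cpBisect s t lo hi ≤ hi ∧
      (∀ j, lo ≤ j → j < cpBisect s t lo hi → s.getD j 0 < t) ∧
      (∀ j, cpBisect s t lo hi ≤ j → j < hi → ¬ s.getD j 0 < t) := by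
  intro d
  induction d using Nat.strong_induction_on with
  | _ d ih =>
    intro lo hi hd hle hlen
    rw [cpBisect]
    by_cases hlt : lo < hi
    · rw [if_pos hlt]
      by_cases hc : s.getD ((lo + hi) / 2) 0 < t
      · rw [if_pos hc]
        have hrec := ih (hi - ((lo + hi) / 2 + 1)) (by omega) ((lo + hi) / 2 + 1) hi rfl (by omega) hlen
        refine ⟨by omega, hrec.2.1, ?_, hrec.2.2.2⟩
        intro j hj₁ hj₂
        by_cases hjm : j ≤ (lo + hi) / 2
        · exact lt_of_le_of_lt (hm j ((lo + hi) / 2) hjm (by omega)) hc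
        · exact hrec.2.2.1 j (by omega) hj₂
      · rw [if_neg hc]
        have hrec := ih ((lo + hi) / 2 - lo) (by omega) lo ((lo + hi) / 2) rfl (by omega) (by omega)
        refine ⟨hrec.1, by omega, hrec.2.2.1, ?_⟩
        intro j hj₁ hj₂
        by_cases hjm : j < (lo + hi) / 2
        · exact hrec.2.2.2 j hj₁ hjm
        · intro hjlt
          exact hc (lt_of_le_of_lt (hm ((lo + hi) / 2) j (by omega) (by omega)) hjlt)
    · rw [if_neg hlt]
      exact ⟨le_refl _, by omega, by omega, by omega⟩

theorem bisect_card (s : List Int) (t : Int)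
    (hm : ∀ i j, i ≤ j → j < s.length → s.getD i 0 ≤ s.getD j 0)
    (lo hi : Nat) (hle : lo ≤ hi) (hlen : hi ≤ s.length) :
    ((Finset.Ico lo hi).filter (fun j => s.getD j 0 < t)).card = cpBisect s t lo hi - lo := by
  obtain ⟨h1, h2, h3, h4⟩ := bisect_spec s t hm (hi - lo) lo hi rfl hle hlen
  have : (Finset.Ico lo hi).filter (fun j => s.getD j 0 < t) = Finset.Ico lo (cpBisect s t lo hi) := by
    ext j
    simp only [Finset.mem_filter, Finset.mem_Ico]
    constructor
    · rintro ⟨⟨hj1, hj2⟩, hj3⟩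
      refine ⟨hj1, ?_⟩
      by_contra hge
      exact h4 j (by omega) hj2 hj3
    · rintro ⟨hj1, hj2⟩
      exact ⟨⟨hj1, by omega⟩, h3 j hj1 hj2⟩
  rw [this, Nat.card_Ico]

theorem loopA_eq (s : List Int) (k : Int)
    (hm : ∀ i j, i ≤ j → j < s.length → s.getD i 0 ≤ s.getD j 0) :
    ∀ d (count : Int) (l r : Nat), l ≤ r → r < s.length → r - l = d →
      cpLoopA s k count (l : Int) (r : Int) = count + (pairQ s k l r : Int) := by
  intro d
  induction d using Nat.strong_induction_on with
  | _ d ih =>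
    intro count l r hlr hr hd
    rw [cpLoopA]
    by_cases hlt : l < r
    · rw [if_pos (by exact_mod_cast hlt)]
      simp only [Int.toNat_natCast]
      by_cases hc : s.getD l 0 + s.getD r 0 < k
      · rw [if_pos hc]
        have hcast : (r : Int) = ((r : Nat) : Int) := rfl
        have hstep : ((l : Int) + 1) = ((l + 1 : Nat) : Int) := by push_cast; ring
        rw [hstep]
        rw [ih (r - (l + 1)) (by omega) _ (l + 1) r (by omega) hr rfl]
        have hrow : ((Finset.Ico (l + 1) (r + 1)).filter (fun j => s.getD l 0 + s.getD j 0 < k)).card = r - l := by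
          rw [Finset.filter_true_of_mem, Nat.card_Ico]
          · omega
          · intro j hj
            simp only [Finset.mem_Ico] at hj
            exact lt_of_le_of_lt (by have := hm j r (by omega) hr; omega) hc
        have hsplit : pairQ s k l r = (r - l) + pairQ s k (l + 1) r := by
          unfold pairQ
          rw [Finset.sum_eq_sum_Ico_succ_bot hlt, hrow]
        rw [hsplit]
        push_cast
        omega
      · rw [if_neg hc]
        have hstep : ((r : Int) - 1) = ((r - 1 : Nat) : Int) := by omega
        rw [hstep]
        rw [ih (r - 1 - l) (by omega) count l (r - 1) (by omega) (by omega) rfl]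
        have hQ : pairQ s k l r = pairQ s k l (r - 1) := by
          obtain ⟨r', rfl⟩ : ∃ r', r = r' + 1 := ⟨r - 1, by omega⟩
          simp only [Nat.add_sub_cancel]
          unfold pairQ
          rw [Finset.sum_Ico_succ_top (by omega : l ≤ r')]
          have htop : ((Finset.Ico (r' + 1) (r' + 1 + 1)).filter (fun j => s.getD r' 0 + s.getD j 0 < k)).card = 0 := by
            rw [Finset.card_eq_zero, Finset.filter_eq_empty_iff]
            intro j hj
            simp only [Finset.mem_Ico] at hj
            have hjr : j = r' + 1 := by omega
            subst hjr
            have := hm l r' (by omega) (by omega)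
            omega
          rw [htop, Nat.add_zero]
          apply Finset.sum_congr rfl
          intro i hi
          simp only [Finset.mem_Ico] at hi
          have hins : Finset.Ico (i + 1) (r' + 1 + 1) = insert (r' + 1) (Finset.Ico (i + 1) (r' + 1)) := by
            ext j
            simp only [Finset.mem_Ico, Finset.mem_insert]
            omega
          rw [hins, Finset.filter_insert]
          rw [if_neg]
          have := hm l i (by omega) (by omega)
          omega
        rw [hQ]
    · rw [if_neg (by exact_mod_cast hlt)]
      have hlr' : l = r := by omega
      subst hlr'
      unfold pairQ
      simp
theorem foldl_add_int (f : Nat → Int) : ∀ (l : List Nat) (c : Int),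
    l.foldl (fun acc i => acc + f i) c = c + (l.map f).sum := by
  intro l
  induction l with
  | nil => intro c; simp
  | cons x xs ih => intro c; simp [List.foldl, ih]; ring

theorem sum_map_range_eq (f : Nat → Int) (n : Nat) :
    ((List.range n).map f).sum = ∑ i ∈ Finset.range n, f i := by
  induction n with
  | zero => simp
  | succ m ih => rw [List.range_succ, Finset.sum_range_succ, ← ih]; simp

theorem count_pairs_sum_less_than_k_spec : Claim_equal_count_pairs_sum_less_than_k := by
  intro arr k _
  unfold Spec_count_pairs_sum_less_than_k count_pairs_sum_less_than_k count_pairs_sum_less_than_k_alt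
  set s := PySem.List.sorted arr (fun x => x) false with hs
  have hm := fun i j hij hj => sorted_getD_mono arr i j hij hj
  rw [foldl_add_int, sum_map_range_eq]
  simp only [Int.zero_add]
  have hterm : ∀ i ∈ Finset.range s.length,
      ((cpBisect s (k - s.getD i 0) (i + 1) s.length : Nat) : Int) - ((i : Int) + 1)
        = (((Finset.Ico (i + 1) s.length).filter (fun j => s.getD i 0 + s.getD j 0 < k)).card : Int) := by
    intro i hi
    simp only [Finset.mem_range] at hi
    have hcard := bisect_card s (k - s.getD i 0) hm (i + 1) s.length (by omega) (le_refl _)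
    have hsp := bisect_spec s (k - s.getD i 0) hm (s.length - (i + 1)) (i + 1) s.length rfl (by omega) (le_refl _)
    have hpred : (Finset.Ico (i + 1) s.length).filter (fun j => s.getD j 0 < k - s.getD i 0)
        = (Finset.Ico (i + 1) s.length).filter (fun j => s.getD i 0 + s.getD j 0 < k) := by
      apply Finset.filter_congr
      intro j _
      constructor <;> (intro h; omega)
    rw [hpred] at hcard
    have h1 := hsp.1
    omega
  rw [Finset.sum_congr rfl hterm]
  by_cases hn : s.length = 0
  · rw [hn]
    rw [cpLoopA]
    norm_num
  · obtain ⟨n', hn'⟩ : ∃ n', s.length = n' + 1 := ⟨s.length - 1, by omega⟩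
    have hsn : ((s.length : Int) - 1) = ((n' : Nat) : Int) := by omega
    rw [hsn]
    have hl := loopA_eq s k hm (n' - 0) 0 0 n' (by omega) (by omega) rfl
    rw [Nat.cast_zero] at hl
    rw [hl]
    have hnat : pairQ s k 0 n' = ∑ x ∈ Finset.range s.length, ((Finset.Ico (x + 1) s.length).filter (fun j => s.getD x 0 + s.getD j 0 < k)).card := by
      rw [hn', Finset.sum_range_succ]
      have hemp : Finset.Ico (n' + 1) (n' + 1) = ∅ := Finset.Ico_self _
      rw [hemp, Finset.filter_empty, Finset.card_empty, Nat.add_zero]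
      unfold pairQ
      rw [Finset.range_eq_Ico]
    rw [hnat]
    push_cast
    ring
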